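-- pv_equiv track=rewrite | github.com/CesarChaMal/interview-patterns-24x | examples/python/dijkstra_examples.py | minimum_cost_to_make_valid_path
-- ===== SOURCE A (Python) =====
-- import heapq
--
-- def minimum_cost_to_make_valid_path(grid):
--     m, n = len(grid), len(grid[0])
--     directions = [(0, 1), (0, -1), (1, 0), (-1, 0)]
--
--     # (cost, row, col)
--     pq = [(0, 0, 0)]
--     costs = [[float('inf')] * n for _ in range(m)]
--     costs[0][0] = 0
--
--     while pq:
--         cost, row, col = heapq.heappop(pq)
--
--         if row == m - 1 and col == n - 1:
--             return cost
--
--         if cost > costs[row][col]: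
--             continue
--
--         for i, (dr, dc) in enumerate(directions):
--             nr, nc = row + dr, col + dc
--             if 0 <= nr < m and 0 <= nc < n:
--                 new_cost = cost + (0 if grid[row][col] == i + 1 else 1)
--                 if new_cost < costs[nr][nc]:
--                     costs[nr][nc] = new_cost
--                     heapq.heappush(pq, (new_cost, nr, nc))
--
--     return -1
-- ===== SOURCE B (Python) =====
-- def minimum_cost_to_make_valid_path(grid):
--     m, n = len(grid), len(grid[0])
--     directions = [(0, 1), (0, -1), (1, 0), (-1, 0)]
--
--     # decrease-key Dijkstra: `pending` holds exactly one tentative entry per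
--     # discovered-but-unfinished cell; superseded entries are overwritten, so
--     # no staleness test is ever needed.
--     dist = {(0, 0): 0}
--     pending = {(0, 0): 0}
--
--     while pending:
--         (row, col), d = min(pending.items(), key=lambda kv: (kv[1], kv[0]))
--         del pending[(row, col)]
--
--         if row == m - 1 and col == n - 1:
--             return d
--
--         for i, (dr, dc) in enumerate(directions, start=1):
--             nr, nc = row + dr, col + dc
--             if 0 <= nr < m and 0 <= nc < n:
--                 nd = d + (grid[row][col] != i)
--                 if (nr, nc) not in dist or nd < dist[(nr, nc)]:
--                     dist[(nr, nc)] = nd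
--                     pending[(nr, nc)] = nd
--
--     return -1
-- ===== Notes on version B (the rewrite author's own statement) =====
-- stated objective: alternative
-- what changed: Replaces the lazy-deletion binary heap (duplicate queue entries plus a staleness test on pop) by a decrease-key frontier: dictionaries `dist`/`pending` keep exactly one tentative entry per discovered cell, superseded entries are overwritten in place, the minimum is extracted by scanning the frontier, so the staleness branch disappears.
-- outside the precondition, e.g. on minimum_cost_to_make_valid_path([[1, 1], [2]]): A returns 1, B returns 1
import Mathlib
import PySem

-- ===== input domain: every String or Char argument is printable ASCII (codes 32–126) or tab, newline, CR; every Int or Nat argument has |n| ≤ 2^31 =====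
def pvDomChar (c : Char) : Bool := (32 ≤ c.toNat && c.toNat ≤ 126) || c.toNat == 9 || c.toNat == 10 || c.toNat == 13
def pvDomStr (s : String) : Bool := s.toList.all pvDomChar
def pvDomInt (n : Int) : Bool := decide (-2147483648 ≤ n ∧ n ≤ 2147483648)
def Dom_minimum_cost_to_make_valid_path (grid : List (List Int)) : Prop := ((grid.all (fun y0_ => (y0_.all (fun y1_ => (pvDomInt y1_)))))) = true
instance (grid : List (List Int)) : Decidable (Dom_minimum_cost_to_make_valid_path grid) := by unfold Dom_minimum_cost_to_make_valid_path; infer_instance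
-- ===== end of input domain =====

-- B replaces A's lazy-deletion binary heap by a decrease-key frontier dictionary
-- (one tentative entry per discovered cell, no staleness test); same return value
-- on every grid admitted by Pre_ (objective: alternative, not faster).

-- ===== PORT A =====

-- lexicographic ≤ on the (cost, row, col) tuples of A's priority queue
def pvEntryLe (a b : Int × Int × Int) : Bool :=
  decide (a.1 < b.1) || (a.1 == b.1 && (decide (a.2.1 < b.2.1) || (a.2.1 == b.2.1 && decide (a.2.2 ≤ b.2.2))))

def pvHeapMin (x : Int × Int × Int) (xs : List (Int × Int × Int)) : Int × Int × Int :=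
  xs.foldl (fun acc y => if pvEntryLe acc y then acc else y) x

-- heapq model: the program observes the heap only through heappop (the least tuple,
-- lexicographic order) and heappush; equal tuples never coexist in this queue, so
-- "least element, remove one occurrence" is exact.
def pvHeapPop (pq : List (Int × Int × Int)) : Option ((Int × Int × Int) × List (Int × Int × Int)) :=
  match pq with
  | [] => none
  | x :: xs => let e := pvHeapMin x xs; some (e, (x :: xs).erase e)

-- costs[r][c]; `none` models float('inf'); exact for the nonnegative in-range indices A uses
def pvMatGet (costs : List (List (Option Int))) (r c : Int) : Option Int :=
  PySem.List.pyGetD (PySem.List.pyGetD costs r []) c none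

def pvMatSet (costs : List (List (Option Int))) (r c : Int) (v : Int) : List (List (Option Int)) :=
  costs.set r.toNat ((PySem.List.pyGetD costs r []).set c.toNat (some v))

def pvDirs : List (Int × Int) := [(0, 1), (0, -1), (1, 0), (-1, 0)]

def pvRelaxA (grid : List (List Int)) (m n cost row col : Int)
    (st : List (Int × Int × Int) × List (List (Option Int))) (idir : Int × (Int × Int)) :
    List (Int × Int × Int) × List (List (Option Int)) :=
  let nr := row + idir.2.1
  let nc := col + idir.2.2
  if 0 ≤ nr ∧ nr < m ∧ 0 ≤ nc ∧ nc < n then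
    let new_cost := cost + (if PySem.List.pyGetD (PySem.List.pyGetD grid row []) col 0 = idir.1 + 1 then 0 else 1)
    if (match pvMatGet st.2 nr nc with | none => true | some w => decide (new_cost < w)) then
      (st.1 ++ [(new_cost, nr, nc)], pvMatSet st.2 nr nc new_cost)
    else st
  else st

def pvFuel (m n : Int) : Nat := 4 * ((m * n).toNat + 1) * ((m * n).toNat + 1) + 2

def pvLoopA (grid : List (List Int)) (m n : Int) :
    Nat → List (Int × Int × Int) → List (List (Option Int)) → Int
  | 0, _, _ => -1
  | fuel + 1, pq, costs =>
    match pvHeapPop pq with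
    | none => -1
    | some (e, pq') =>
      if e.2.1 = m - 1 ∧ e.2.2 = n - 1 then e.1
      else if (match pvMatGet costs e.2.1 e.2.2 with | none => false | some w => decide (w < e.1)) then
        pvLoopA grid m n fuel pq' costs
      else
        let st := (PySem.List.enumerate pvDirs).foldl (pvRelaxA grid m n e.1 e.2.1 e.2.2) (pq', costs)
        pvLoopA grid m n fuel st.1 st.2

def minimum_cost_to_make_valid_path (grid : List (List Int)) : Int :=
  let m : Int := grid.length
  let n : Int := (PySem.List.pyGetD grid 0 []).length  -- len(grid[0]); grid = [] raises: outside Pre_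
  let costs := pvMatSet (List.replicate m.toNat (List.replicate n.toNat (none : Option Int))) 0 0 0
  pvLoopA grid m n (pvFuel m n) [(0, 0, 0)] costs

-- ===== PORT B =====

-- strict lexicographic < on min()'s key (d, (row, col))
def pvKeyLt (a b : Int × Int × Int) : Bool :=
  decide (a.1 < b.1) || (a.1 == b.1 && (decide (a.2.1 < b.2.1) || (a.2.1 == b.2.1 && decide (a.2.2 < b.2.2))))

-- min(pending.items(), key=...): first item of least key
def pvMinItem (x : (Int × Int) × Int) (xs : List ((Int × Int) × Int)) : (Int × Int) × Int :=
  xs.foldl (fun acc kv => if pvKeyLt (kv.2, kv.1.1, kv.1.2) (acc.2, acc.1.1, acc.1.2) then kv else acc) x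

def pvRelaxB (grid : List (List Int)) (m n d row col : Int)
    (st : PySem.Dict (Int × Int) Int × PySem.Dict (Int × Int) Int) (idir : Int × (Int × Int)) :
    PySem.Dict (Int × Int) Int × PySem.Dict (Int × Int) Int :=
  let nr := row + idir.2.1
  let nc := col + idir.2.2
  if 0 ≤ nr ∧ nr < m ∧ 0 ≤ nc ∧ nc < n then
    let nd := d + (if PySem.List.pyGetD (PySem.List.pyGetD grid row []) col 0 = idir.1 then 0 else 1)
    if (match st.2.get? (nr, nc) with | none => true | some w => decide (nd < w)) then
      (st.1.insert (nr, nc) nd, st.2.insert (nr, nc) nd)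
    else st
  else st

def pvLoopB (grid : List (List Int)) (m n : Int) :
    Nat → PySem.Dict (Int × Int) Int → PySem.Dict (Int × Int) Int → Int
  | 0, _, _ => -1
  | fuel + 1, pend, dist =>
    match pend.items with
    | [] => -1
    | it :: its =>
      let kv := pvMinItem it its
      let pend' := pend.erase kv.1
      if kv.1.1 = m - 1 ∧ kv.1.2 = n - 1 then kv.2
      else
        let st := (PySem.List.enumerate pvDirs 1).foldl (pvRelaxB grid m n kv.2 kv.1.1 kv.1.2) (pend', dist)
        pvLoopB grid m n fuel st.1 st.2

def minimum_cost_to_make_valid_path_alt (grid : List (List Int)) : Int :=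
  let m : Int := grid.length
  let n : Int := (PySem.List.pyGetD grid 0 []).length
  pvLoopB grid m n (pvFuel m n)
    (PySem.Dict.empty.insert (0, 0) 0) (PySem.Dict.empty.insert (0, 0) 0)

-- ===== PRECONDITION & SPEC =====
-- Pre_ excludes the empty grid (A raises IndexError on len(grid[0])), a zero-width first
-- row (IndexError on costs[0][0]) and ragged grids with a row shorter than the first:
-- there A raises IndexError except when the search happens never to touch the missing
-- cells, in which case A and B return the same value anyway.
def Pre_minimum_cost_to_make_valid_path (grid : List (List Int)) : Prop :=
  grid ≠ [] ∧ 0 < (grid.headD []).length ∧ ∀ row ∈ grid, (grid.headD []).length ≤ row.length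
instance (grid : List (List Int)) : Decidable (Pre_minimum_cost_to_make_valid_path grid) := by
  unfold Pre_minimum_cost_to_make_valid_path; infer_instance

def pvWitness_minimum_cost_to_make_valid_path : List (List Int) := [[1, 1], [3, 1]]

def Spec_minimum_cost_to_make_valid_path (grid : List (List Int)) (out : Int) : Prop := out = minimum_cost_to_make_valid_path_alt grid
instance (grid : List (List Int)) (out : Int) : Decidable (Spec_minimum_cost_to_make_valid_path grid out) := by unfold Spec_minimum_cost_to_make_valid_path; infer_instance

-- ===== CLAIM (what is proved, stated in full; the proofs are below) =====
def Claim_equal_minimum_cost_to_make_valid_path : Prop := ∀ (grid : List (List Int)), Dom_minimum_cost_to_make_valid_path grid → Pre_minimum_cost_to_make_valid_path grid → Spec_minimum_cost_to_make_valid_path grid (minimum_cost_to_make_valid_path grid)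

-- ===== LEMMAS AND PROOFS =====

-- ---------- order lemmas ----------
lemma pvEntryLe_iff (a1 a2 a3 b1 b2 b3 : Int) :
    pvEntryLe (a1, a2, a3) (b1, b2, b3) = true ↔
      (a1 < b1 ∨ (a1 = b1 ∧ (a2 < b2 ∨ (a2 = b2 ∧ a3 ≤ b3)))) := by
  simp only [pvEntryLe, Bool.or_eq_true, decide_eq_true_eq, Bool.and_eq_true, beq_iff_eq]

lemma pvKeyLt_iff (a1 a2 a3 b1 b2 b3 : Int) :
    pvKeyLt (a1, a2, a3) (b1, b2, b3) = true ↔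
      (a1 < b1 ∨ (a1 = b1 ∧ (a2 < b2 ∨ (a2 = b2 ∧ a3 < b3)))) := by
  simp only [pvKeyLt, Bool.or_eq_true, decide_eq_true_eq, Bool.and_eq_true, beq_iff_eq]

lemma pvEntryLe_refl (a : Int × Int × Int) : pvEntryLe a a = true := by
  obtain ⟨a1, a2, a3⟩ := a; rw [pvEntryLe_iff]; omega

lemma pvEntryLe_total (a b : Int × Int × Int) :
    pvEntryLe a b = true ∨ pvEntryLe b a = true := by
  obtain ⟨a1, a2, a3⟩ := a; obtain ⟨b1, b2, b3⟩ := b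
  rw [pvEntryLe_iff, pvEntryLe_iff]; omega

lemma pvEntryLe_antisymm {a b : Int × Int × Int}
    (h1 : pvEntryLe a b = true) (h2 : pvEntryLe b a = true) : a = b := by
  obtain ⟨a1, a2, a3⟩ := a; obtain ⟨b1, b2, b3⟩ := b
  rw [pvEntryLe_iff] at h1 h2
  simp only [Prod.mk.injEq]; omega

lemma pvEntryLe_trans {a b c : Int × Int × Int}
    (h1 : pvEntryLe a b = true) (h2 : pvEntryLe b c = true) : pvEntryLe a c = true := by
  obtain ⟨a1, a2, a3⟩ := a; obtain ⟨b1, b2, b3⟩ := b; obtain ⟨c1, c2, c3⟩ := c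
  rw [pvEntryLe_iff] at h1 h2 ⊢; omega

lemma pvKeyLt_iff_not_le (a b : Int × Int × Int) :
    pvKeyLt a b = true ↔ ¬ pvEntryLe b a = true := by
  obtain ⟨a1, a2, a3⟩ := a; obtain ⟨b1, b2, b3⟩ := b
  rw [pvKeyLt_iff, pvEntryLe_iff]; omega

-- ---------- minimum-selection lemmas ----------
lemma pvHeapMin_spec (xs : List (Int × Int × Int)) :
    ∀ x, (pvHeapMin x xs = x ∨ pvHeapMin x xs ∈ xs) ∧
      ∀ y, (y = x ∨ y ∈ xs) → pvEntryLe (pvHeapMin x xs) y = true := by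
  induction xs with
  | nil =>
    intro x; refine ⟨Or.inl rfl, ?_⟩; rintro y (rfl | hy)
    · exact pvEntryLe_refl y
    · cases hy
  | cons z zs ih =>
    intro x
    have hfold : pvHeapMin x (z :: zs) = pvHeapMin (if pvEntryLe x z then x else z) zs := by
      simp [pvHeapMin, List.foldl_cons]
    obtain ⟨hmem, hle⟩ := ih (if pvEntryLe x z then x else z)
    have haccx : pvEntryLe (if pvEntryLe x z then x else z) x = true := by
      split
      · exact pvEntryLe_refl x
      · next h =>
        rcases pvEntryLe_total x z with h' | h'
        · exact absurd h' h
        · exact h'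
    have haccz : pvEntryLe (if pvEntryLe x z then x else z) z = true := by
      split
      · next h => exact h
      · exact pvEntryLe_refl z
    constructor
    · rw [hfold]
      rcases hmem with h | h
      · rw [h]; split
        · exact Or.inl rfl
        · exact Or.inr List.mem_cons_self
      · exact Or.inr (List.mem_cons_of_mem _ h)
    · rintro y (rfl | hy)
      · rw [hfold]; exact pvEntryLe_trans (hle _ (Or.inl rfl)) haccx
      · rcases List.mem_cons.mp hy with rfl | hy'
        · rw [hfold]; exact pvEntryLe_trans (hle _ (Or.inl rfl)) haccz
        · rw [hfold]; exact hle _ (Or.inr hy')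

def pvKeyOf (kv : (Int × Int) × Int) : Int × Int × Int := (kv.2, kv.1.1, kv.1.2)

lemma pvMinItem_spec (xs : List ((Int × Int) × Int)) :
    ∀ x, (pvMinItem x xs = x ∨ pvMinItem x xs ∈ xs) ∧
      ∀ y, (y = x ∨ y ∈ xs) → pvEntryLe (pvKeyOf (pvMinItem x xs)) (pvKeyOf y) = true := by
  induction xs with
  | nil =>
    intro x; refine ⟨Or.inl rfl, ?_⟩; rintro y (rfl | hy)
    · exact pvEntryLe_refl _
    · cases hy
  | cons z zs ih =>
    intro x
    have hfold : pvMinItem x (z :: zs)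
        = pvMinItem (if pvKeyLt (pvKeyOf z) (pvKeyOf x) then z else x) zs := by
      simp [pvMinItem, List.foldl_cons, pvKeyOf]
    obtain ⟨hmem, hle⟩ := ih (if pvKeyLt (pvKeyOf z) (pvKeyOf x) then z else x)
    have haccx : pvEntryLe (pvKeyOf (if pvKeyLt (pvKeyOf z) (pvKeyOf x) then z else x)) (pvKeyOf x) = true := by
      split
      · next h =>
        rcases pvEntryLe_total (pvKeyOf z) (pvKeyOf x) with h' | h'
        · exact h'
        · exact absurd h' ((pvKeyLt_iff_not_le _ _).mp h)
      · exact pvEntryLe_refl _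
    have haccz : pvEntryLe (pvKeyOf (if pvKeyLt (pvKeyOf z) (pvKeyOf x) then z else x)) (pvKeyOf z) = true := by
      split
      · exact pvEntryLe_refl _
      · next h =>
        by_cases h' : pvEntryLe (pvKeyOf x) (pvKeyOf z) = true
        · exact h'
        · exact absurd ((pvKeyLt_iff_not_le _ _).mpr h') h
    constructor
    · rw [hfold]
      rcases hmem with h | h
      · rw [h]; split
        · exact Or.inr List.mem_cons_self
        · exact Or.inl rfl
      · exact Or.inr (List.mem_cons_of_mem _ h)
    · rintro y (rfl | hy)
      · rw [hfold]; exact pvEntryLe_trans (hle _ (Or.inl rfl)) haccx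
      · rcases List.mem_cons.mp hy with rfl | hy'
        · rw [hfold]; exact pvEntryLe_trans (hle _ (Or.inl rfl)) haccz
        · rw [hfold]; exact hle _ (Or.inr hy')

-- ---------- dict erase ----------
lemma pvFindFilter (k k' : Int × Int) (l : List ((Int × Int) × Int)) :
    (l.filter (fun p => !(p.1 == k))).find? (fun p => p.1 == k')
      = if k' = k then none else l.find? (fun p => p.1 == k') := by
  induction l with
  | nil => split <;> simp
  | cons p l ihl =>
    by_cases hpk : p.1 = k
    · rw [List.filter_cons_of_neg (by simp [hpk]), ihl]
      by_cases hkk : k' = k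
      · simp [hkk]
      · simp only [if_neg hkk, List.find?_cons]
        have : (p.1 == k') = false := by
          have : p.1 ≠ k' := by rw [hpk]; exact fun h => hkk h.symm
          simpa using this
        rw [this]
    · rw [List.filter_cons_of_pos (by simp [hpk]), List.find?_cons]
      by_cases hpk' : p.1 = k'
      · have hkk : ¬ k' = k := by rw [← hpk']; exact fun h => hpk h
        simp only [if_neg hkk, List.find?_cons]
        have hb : (p.1 == k') = true := by simpa using hpk'
        rw [hb]
      · have hb : (p.1 == k') = false := by simpa using hpk'
        rw [hb, ihl]
        by_cases hkk : k' = k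
        · simp [hkk]
        · simp only [if_neg hkk, List.find?_cons, hb]

lemma pvGet?_erase (d : PySem.Dict (Int × Int) Int) (k k' : Int × Int) :
    (d.erase k).get? k' = if k' = k then none else d.get? k' := by
  show (Option.map _ (List.find? _ (d.items.filter _))) = _
  rw [pvFindFilter]
  split <;> rfl

lemma pvNodupKeys_erase (d : PySem.Dict (Int × Int) Int) (k : Int × Int)
    (h : d.keys.Nodup) : (d.erase k).keys.Nodup := by
  apply List.Nodup.sublist _ h
  exact List.Sublist.map _ List.filter_sublist

-- ---------- matrix lemmas ----------
def pvCellIn (m n r c : Int) : Prop := 0 ≤ r ∧ r < m ∧ 0 ≤ c ∧ c < n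

def pvShape (m n : Int) (costs : List (List (Option Int))) : Prop :=
  costs.length = m.toNat ∧ ∀ row ∈ costs, row.length = n.toNat

lemma pvMG (costs : List (List (Option Int))) {r c : Int} (hr0 : 0 ≤ r) (hc0 : 0 ≤ c)
    (hr : r.toNat < costs.length) (hc : c.toNat < (costs[r.toNat]).length) :
    pvMatGet costs r c = (costs[r.toNat])[c.toNat] := by
  unfold pvMatGet
  rw [PySem.List.pyGetD_of_nonneg _ _ hr0, List.getD_eq_getElem _ _ hr,
      PySem.List.pyGetD_of_nonneg _ _ hc0, List.getD_eq_getElem _ _ hc]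

lemma pvMS (costs : List (List (Option Int))) {r : Int} (c : Int) (v : Int) (hr0 : 0 ≤ r)
    (hr : r.toNat < costs.length) :
    pvMatSet costs r c v = costs.set r.toNat ((costs[r.toNat]).set c.toNat (some v)) := by
  unfold pvMatSet
  rw [PySem.List.pyGetD_of_nonneg _ _ hr0, List.getD_eq_getElem _ _ hr]

lemma pvCell_bounds {m n r c : Int} (hs : pvShape m n costs) (h : pvCellIn m n r c) :
    r.toNat < costs.length ∧ c.toNat < (costs[r.toNat]'(by
      obtain ⟨h1, _⟩ := hs; obtain ⟨hr0, hrm, _, _⟩ := h; omega)).length := by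
  obtain ⟨h1, h2⟩ := hs; obtain ⟨hr0, hrm, hc0, hcn⟩ := h
  have hrl : r.toNat < costs.length := by omega
  have := h2 _ (List.getElem_mem hrl)
  constructor
  · exact hrl
  · omega

lemma pvShape_set {m n r c : Int} {costs : List (List (Option Int))} (v : Int)
    (hs : pvShape m n costs) (h : pvCellIn m n r c) :
    pvShape m n (pvMatSet costs r c v) := by
  obtain ⟨hr, hc⟩ := pvCell_bounds hs h
  rw [pvMS costs c v h.1 hr]
  obtain ⟨h1, h2⟩ := hs
  refine ⟨by simpa using h1, ?_⟩
  intro row hrow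
  rcases List.mem_or_eq_of_mem_set hrow with h' | h'
  · exact h2 _ h'
  · subst h'; simp [h2 _ (List.getElem_mem hr)]

lemma pvMatGet_set_self {m n r c : Int} {costs : List (List (Option Int))} (v : Int)
    (hs : pvShape m n costs) (h : pvCellIn m n r c) :
    pvMatGet (pvMatSet costs r c v) r c = some v := by
  obtain ⟨hr, hc⟩ := pvCell_bounds hs h
  rw [pvMS costs c v h.1 hr]
  unfold pvMatGet
  rw [PySem.List.pyGetD_of_nonneg _ _ h.1, PySem.List.pyGetD_of_nonneg _ _ h.2.2.1]
  simp only [List.getD_eq_getElem?_getD]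
  rw [List.getElem?_set_self hr]
  simp only [Option.getD_some]
  rw [List.getElem?_set_self (by simpa using hc)]
  rfl

lemma pvMatGet_set_ne {m n r c r' c' : Int} {costs : List (List (Option Int))} (v : Int)
    (hs : pvShape m n costs) (h : pvCellIn m n r c) (h' : pvCellIn m n r' c')
    (hne : ¬ (r' = r ∧ c' = c)) :
    pvMatGet (pvMatSet costs r c v) r' c' = pvMatGet costs r' c' := by
  obtain ⟨hr, hc⟩ := pvCell_bounds hs h
  obtain ⟨hr', hc'⟩ := pvCell_bounds hs h'
  rw [pvMS costs c v h.1 hr]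
  unfold pvMatGet
  rw [PySem.List.pyGetD_of_nonneg _ _ h'.1, PySem.List.pyGetD_of_nonneg _ _ h'.2.2.1,
      PySem.List.pyGetD_of_nonneg _ _ h'.1, PySem.List.pyGetD_of_nonneg _ _ h'.2.2.1,
      List.getD_eq_getElem?_getD, List.getD_eq_getElem?_getD]
  simp only [List.getD_eq_getElem?_getD]
  rcases eq_or_ne r.toNat r'.toNat with he | he
  · have hrr : r' = r := by obtain ⟨h1, _, _, _⟩ := h; obtain ⟨h1', _, _, _⟩ := h'; omega
    have hcc : ¬ c' = c := fun hcc => hne ⟨hrr, hcc⟩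
    have hcn : c.toNat ≠ c'.toNat := by
      obtain ⟨_, _, h3, _⟩ := h; obtain ⟨_, _, h3', _⟩ := h'; omega
    rw [← he, List.getElem?_set_self hr]
    simp only [Option.getD_some]
    rw [List.getElem?_set_ne hcn, List.getElem?_eq_getElem hr]
    rfl
  · rw [List.getElem?_set_ne he]

-- ---------- sums, potential, measure ----------
lemma pvSumSet {α : Type} (f : α → Nat) :
    ∀ (l : List α) (i : Nat) (h : i < l.length) (a : α),
      ((l.set i a).map f).sum + f (l[i]'h) = (l.map f).sum + f a := by
  intro l
  induction l with
  | nil => intro i h; cases h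
  | cons x xs ih =>
    intro i h a
    cases i with
    | zero => simp [List.set]; omega
    | succ j =>
      have hj : j < xs.length := by simpa using h
      have := ih j hj a
      simp only [List.set, List.map_cons, List.sum_cons, List.getElem_cons_succ]
      omega

def pvPotV (K : Nat) : Option Int → Nat
  | none => K + 1
  | some v => v.toNat

def pvPot (K : Nat) (costs : List (List (Option Int))) : Nat :=
  (costs.map (fun row => (row.map (pvPotV K)).sum)).sum

def pvNoneW : Option Int → Nat
  | none => 1
  | some _ => 0

def pvUndisc (costs : List (List (Option Int))) : Nat :=
  (costs.map (fun row => (row.map pvNoneW).sum)).sum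

lemma pvPot_set {m n r c : Int} {costs : List (List (Option Int))} (K : Nat) (v : Int)
    (hs : pvShape m n costs) (h : pvCellIn m n r c) :
    pvPot K (pvMatSet costs r c v) + pvPotV K (pvMatGet costs r c) = pvPot K costs + v.toNat := by
  obtain ⟨hr, hc⟩ := pvCell_bounds hs h
  rw [pvMS costs c v h.1 hr, pvMG costs h.1 h.2.2.1 hr hc]
  unfold pvPot
  have hrow := pvSumSet (pvPotV K) (costs[r.toNat]) c.toNat hc (some v)
  have hmat := pvSumSet (fun row => (row.map (pvPotV K)).sum) costs r.toNat hr
      ((costs[r.toNat]).set c.toNat (some v))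
  simp only at hmat hrow ⊢
  have hv : pvPotV K (some v) = v.toNat := rfl
  omega

lemma pvUndisc_set {m n r c : Int} {costs : List (List (Option Int))} (v : Int)
    (hs : pvShape m n costs) (h : pvCellIn m n r c) :
    pvUndisc (pvMatSet costs r c v) + pvNoneW (pvMatGet costs r c) = pvUndisc costs := by
  obtain ⟨hr, hc⟩ := pvCell_bounds hs h
  rw [pvMS costs c v h.1 hr, pvMG costs h.1 h.2.2.1 hr hc]
  unfold pvUndisc
  have hrow := pvSumSet pvNoneW (costs[r.toNat]) c.toNat hc (some v)
  have hmat := pvSumSet (fun row => (row.map pvNoneW).sum) costs r.toNat hr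
      ((costs[r.toNat]).set c.toNat (some v))
  simp only at hmat hrow ⊢
  have hv : pvNoneW (some v) = 0 := rfl
  omega

def pvMu (K : Nat) (pq : List (Int × Int × Int)) (costs : List (List (Option Int))) : Nat :=
  pq.length + 4 * pvPot K costs

-- ---------- invariants ----------
def pvWinv (m n : Int) (pq : List (Int × Int × Int)) (costs : List (List (Option Int))) : Prop :=
  pvShape m n costs ∧
  (∀ e ∈ pq, pvCellIn m n e.2.1 e.2.2) ∧
  (∀ e ∈ pq, ∃ w, pvMatGet costs e.2.1 e.2.2 = some w ∧ w ≤ e.1) ∧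
  (∀ e ∈ pq, 0 ≤ e.1 ∧ e.1 + (pvUndisc costs : Int) ≤ m * n) ∧
  (∀ r c w, pvCellIn m n r c → pvMatGet costs r c = some w → 0 ≤ w ∧ w + (pvUndisc costs : Int) ≤ m * n) ∧
  pq.Pairwise (fun e e' => e.2 = e'.2 → e.1 ≠ e'.1) ∧
  (∀ w, pvMatGet costs (m - 1) (n - 1) = some w → (w, m - 1, n - 1) ∈ pq)

def pvRrel (m n : Int) (pq : List (Int × Int × Int)) (costs : List (List (Option Int)))
    (pend dist : PySem.Dict (Int × Int) Int) : Prop :=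
  (∀ r c, pvCellIn m n r c → dist.get? (r, c) = pvMatGet costs r c) ∧
  (∀ k v, dist.get? k = some v → pvCellIn m n k.1 k.2) ∧
  (∀ r c v, pend.get? (r, c) = some v ↔ ((v, r, c) ∈ pq ∧ pvMatGet costs r c = some v)) ∧
  pend.keys.Nodup ∧ dist.keys.Nodup

def pvMid (m n d : Int) (pq : List (Int × Int × Int)) (costs : List (List (Option Int)))
    (pend dist : PySem.Dict (Int × Int) Int) : Prop :=
  pvWinv m n pq costs ∧ pvRrel m n pq costs pend dist ∧ 0 ≤ d ∧ d + (pvUndisc costs : Int) ≤ m * n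

lemma pvNodup_of_pairwise {pq : List (Int × Int × Int)}
    (h : pq.Pairwise (fun e e' => e.2 = e'.2 → e.1 ≠ e'.1)) : pq.Nodup := by
  apply h.imp
  intro a b hab rfl
  exact absurd rfl (hab rfl)

-- ---------- a successful push, both sides ----------
lemma pvPush (m n d nd nr nc : Int)
    (pq : List (Int × Int × Int)) (costs : List (List (Option Int)))
    (pend dist : PySem.Dict (Int × Int) Int)
    (hmid : pvMid m n d pq costs pend dist)
    (hcellin : pvCellIn m n nr nc)
    (hnd0 : 0 ≤ nd)
    (hlt_old : ∀ w, pvMatGet costs nr nc = some w → nd < w)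
    (hU : pvUndisc (pvMatSet costs nr nc nd) ≤ pvUndisc costs)
    (hJnew : nd + (pvUndisc (pvMatSet costs nr nc nd) : Int) ≤ m * n)
    (hPot : pvPot (m * n).toNat (pvMatSet costs nr nc nd) + 1 ≤ pvPot (m * n).toNat costs) :
    pvMid m n d (pq ++ [(nd, nr, nc)]) (pvMatSet costs nr nc nd)
        (pend.insert (nr, nc) nd) (dist.insert (nr, nc) nd) ∧
    pvMu (m * n).toNat (pq ++ [(nd, nr, nc)]) (pvMatSet costs nr nc nd)
      ≤ pvMu (m * n).toNat pq costs := by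
  obtain ⟨⟨hshape, hcells, hbound, hJpq, hJmat, hpair, htgt⟩, ⟨hdist, hdom, hpend, hnp, hnd'⟩, hd0, hdJ⟩ := hmid
  have hUle : (pvUndisc (pvMatSet costs nr nc nd) : Int) ≤ (pvUndisc costs : Int) := by
    exact_mod_cast hU
  constructor
  · refine ⟨⟨pvShape_set nd hshape hcellin, ?_, ?_, ?_, ?_, ?_, ?_⟩, ⟨?_, ?_, ?_, ?_, ?_⟩, hd0, by omega⟩
    · -- cells in range
      intro e he
      rcases List.mem_append.mp he with h | h
      · exact hcells e h
      · simp only [List.mem_singleton] at h; subst h; exact hcellin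
    · -- every entry dominates its cell's cost
      intro e he
      rcases List.mem_append.mp he with h | h
      · by_cases hc : e.2.1 = nr ∧ e.2.2 = nc
        · obtain ⟨w0, hw0, hwle⟩ := hbound e h
          rw [hc.1, hc.2] at hw0
          have hlt := hlt_old w0 hw0
          refine ⟨nd, ?_, by omega⟩
          rw [hc.1, hc.2]
          exact pvMatGet_set_self nd hshape hcellin
        · obtain ⟨w0, hw0, hwle⟩ := hbound e h
          refine ⟨w0, ?_, hwle⟩
          rw [pvMatGet_set_ne nd hshape hcellin (hcells e h) hc]
          exact hw0
      · simp only [List.mem_singleton] at h; subst h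
        exact ⟨nd, pvMatGet_set_self nd hshape hcellin, le_refl _⟩
    · -- J for queue entries
      intro e he
      rcases List.mem_append.mp he with h | h
      · obtain ⟨h1, h2⟩ := hJpq e h
        exact ⟨h1, by omega⟩
      · simp only [List.mem_singleton] at h; subst h
        exact ⟨hnd0, hJnew⟩
    · -- J for matrix values
      intro r c w' hcell' hw'
      by_cases hc : r = nr ∧ c = nc
      · rw [hc.1, hc.2, pvMatGet_set_self nd hshape hcellin] at hw'
        injection hw' with hw'; subst hw'
        exact ⟨hnd0, hJnew⟩
      · rw [pvMatGet_set_ne nd hshape hcellin hcell' hc] at hw'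
        obtain ⟨h1, h2⟩ := hJmat r c w' hcell' hw'
        exact ⟨h1, by omega⟩
    · -- pairwise distinct costs per cell
      rw [List.pairwise_append]
      refine ⟨hpair, List.pairwise_singleton _ _, ?_⟩
      intro a ha b hb hab
      simp only [List.mem_singleton] at hb; subst hb
      obtain ⟨w0, hw0, hwle⟩ := hbound a ha
      have ha21 : a.2.1 = nr := by rw [hab]
      have ha22 : a.2.2 = nc := by rw [hab]
      rw [ha21, ha22] at hw0
      have := hlt_old w0 hw0
      omega
    · -- target presence
      intro w' hw'
      by_cases hc : m - 1 = nr ∧ n - 1 = nc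
      · rw [hc.1, hc.2, pvMatGet_set_self nd hshape hcellin] at hw'
        injection hw' with hw'; subst hw'
        apply List.mem_append_right
        simp [hc.1, hc.2]
      · have htin : pvCellIn m n (m - 1) (n - 1) := by
          obtain ⟨u1, u2, u3, u4⟩ := hcellin
          exact ⟨by omega, by omega, by omega, by omega⟩
        rw [pvMatGet_set_ne nd hshape hcellin htin hc] at hw'
        exact List.mem_append_left _ (htgt w' hw')
    · -- dist matches costs
      intro r c hcell'
      rw [PySem.Dict.get?_insert]
      by_cases hkc : ((r : Int), (c : Int)) = ((nr : Int), (nc : Int))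
      · have hr : r = nr := (Prod.ext_iff.mp hkc).1
        have hcc : c = nc := (Prod.ext_iff.mp hkc).2
        rw [if_pos hkc, hr, hcc, pvMatGet_set_self nd hshape hcellin]
      · have hne : ¬ (r = nr ∧ c = nc) := by
          intro ⟨h1, h2⟩; exact hkc (by rw [h1, h2])
        rw [if_neg hkc, pvMatGet_set_ne nd hshape hcellin hcell' hne]
        exact hdist r c hcell'
    · -- dist domain
      intro k v hk
      rw [PySem.Dict.get?_insert] at hk
      split at hk
      · next heq => rw [heq]; exact hcellin
      · exact hdom k v hk
    · -- pending characterisation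
      intro r c v
      rw [PySem.Dict.get?_insert]
      by_cases hkc : ((r : Int), (c : Int)) = ((nr : Int), (nc : Int))
      · have hr : r = nr := (Prod.ext_iff.mp hkc).1
        have hcc : c = nc := (Prod.ext_iff.mp hkc).2
        subst hr; subst hcc
        rw [if_pos rfl, pvMatGet_set_self nd hshape hcellin]
        constructor
        · intro hv
          injection hv with hv; subst hv
          exact ⟨List.mem_append_right _ (by simp), rfl⟩
        · intro ⟨_, hv⟩
          injection hv with hv; rw [hv]
      · have hne : ¬ (r = nr ∧ c = nc) := by
          intro ⟨h1, h2⟩; exact hkc (by rw [h1, h2])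
        rw [if_neg hkc]
        constructor
        · intro hv
          obtain ⟨hmem, hget⟩ := (hpend r c v).mp hv
          have hcell' := hcells _ hmem
          refine ⟨List.mem_append_left _ hmem, ?_⟩
          rw [pvMatGet_set_ne nd hshape hcellin hcell' hne]
          exact hget
        · intro ⟨hmem, hget⟩
          have hmem' : (v, r, c) ∈ pq := by
            rcases List.mem_append.mp hmem with h | h
            · exact h
            · exfalso
              simp only [List.mem_singleton, Prod.mk.injEq] at h
              exact hne ⟨h.2.1.symm ▸ rfl, h.2.2.symm ▸ rfl⟩
          have hcell' := hcells _ hmem'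
          rw [pvMatGet_set_ne nd hshape hcellin hcell' hne] at hget
          exact (hpend r c v).mpr ⟨hmem', hget⟩
    · exact PySem.Dict.nodup_keys_insert _ _ _ hnp
    · exact PySem.Dict.nodup_keys_insert _ _ _ hnd'
  · -- measure does not increase
    unfold pvMu
    rw [List.length_append]
    simp only [List.length_singleton]
    omega

-- ---------- the matched relaxation step ----------
lemma pvStep (grid : List (List Int)) (m n d row col i dr dc : Int)
    (pq : List (Int × Int × Int)) (costs : List (List (Option Int)))
    (pend dist : PySem.Dict (Int × Int) Int)
    (h : pvMid m n d pq costs pend dist) :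
    pvMid m n d
        (pvRelaxA grid m n d row col (pq, costs) (i, (dr, dc))).1
        (pvRelaxA grid m n d row col (pq, costs) (i, (dr, dc))).2
        (pvRelaxB grid m n d row col (pend, dist) (i + 1, (dr, dc))).1
        (pvRelaxB grid m n d row col (pend, dist) (i + 1, (dr, dc))).2 ∧
    pvMu (m * n).toNat
        (pvRelaxA grid m n d row col (pq, costs) (i, (dr, dc))).1
        (pvRelaxA grid m n d row col (pq, costs) (i, (dr, dc))).2
      ≤ pvMu (m * n).toNat pq costs := by
  obtain ⟨⟨hshape, hcells, hbound, hJpq, hJmat, hpair, htgt⟩, ⟨hdist, hdom, hpend, hnp, hnd⟩, hd0, hdJ⟩ := h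
  by_cases hin : 0 ≤ row + dr ∧ row + dr < m ∧ 0 ≤ col + dc ∧ col + dc < n
  case neg =>
    simp only [pvRelaxA, pvRelaxB, if_neg hin]
    exact ⟨⟨⟨hshape, hcells, hbound, hJpq, hJmat, hpair, htgt⟩, ⟨hdist, hdom, hpend, hnp, hnd⟩, hd0, hdJ⟩, le_refl _⟩
  case pos =>
  have hcellin : pvCellIn m n (row + dr) (col + dc) := hin
  set nr := row + dr with hnr
  set nc := col + dc with hnc
  set nd : Int := d + (if PySem.List.pyGetD (PySem.List.pyGetD grid row []) col 0 = i + 1 then 0 else 1) with hnd'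
  have hnd0 : 0 ≤ nd ∧ nd ≤ d + 1 := by
    rw [hnd']; split <;> omega
  have hBcond : (match dist.get? (nr, nc) with
      | none => true | some w => decide (nd < w)) = (match pvMatGet costs nr nc with
      | none => true | some w => decide (nd < w)) := by
    rw [hdist _ _ hcellin]
  have hguard : (0 ≤ nr ∧ nr < m ∧ 0 ≤ nc ∧ nc < n) := hin
  -- the two relaxations, with the guard discharged
  have hA : pvRelaxA grid m n d row col (pq, costs) (i, (dr, dc))
      = if (match pvMatGet costs nr nc with | none => true | some w => decide (nd < w))
        then (pq ++ [(nd, nr, nc)], pvMatSet costs nr nc nd) else (pq, costs) := by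
    simp only [pvRelaxA]
    rw [← hnd', ← hnr, ← hnc, if_pos hguard]
  have hB : pvRelaxB grid m n d row col (pend, dist) (i + 1, (dr, dc))
      = if (match pvMatGet costs nr nc with | none => true | some w => decide (nd < w))
        then (pend.insert (nr, nc) nd, dist.insert (nr, nc) nd) else (pend, dist) := by
    simp only [pvRelaxB]
    rw [← hnd', ← hnr, ← hnc, if_pos hguard, hBcond]
  cases hval : pvMatGet costs nr nc with
  | none =>
    rw [hval] at hA hB
    rw [if_pos rfl] at hA hB
    rw [hA, hB]
    have hUeq : pvUndisc (pvMatSet costs nr nc nd) + 1 = pvUndisc costs := by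
      have := pvUndisc_set (m := m) (n := n) nd hshape hcellin
      rw [hval] at this
      simpa [pvNoneW] using this
    have hPeq : pvPot (m * n).toNat (pvMatSet costs nr nc nd) + ((m * n).toNat + 1)
        = pvPot (m * n).toNat costs + nd.toNat := by
      have := pvPot_set (m := m) (n := n) (m * n).toNat nd hshape hcellin
      rw [hval] at this
      simpa [pvPotV] using this
    have hJnew : nd + (pvUndisc (pvMatSet costs nr nc nd) : Int) ≤ m * n := by omega
    apply pvPush m n d nd nr nc pq costs pend dist
      ⟨⟨hshape, hcells, hbound, hJpq, hJmat, hpair, htgt⟩, ⟨hdist, hdom, hpend, hnp, hnd⟩, hd0, hdJ⟩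
      hcellin hnd0.1
    · intro w0 hw0; rw [hval] at hw0; cases hw0
    · omega
    · exact hJnew
    · have hndK : nd.toNat ≤ (m * n).toNat := by
        generalize hmn : m * n = MN at hJnew ⊢
        omega
      generalize hmn : m * n = MN at hPeq hndK ⊢
      omega
  | some w =>
    rw [hval] at hA hB
    by_cases hlt : nd < w
    case pos =>
      rw [if_pos (by simpa using hlt)] at hA hB
      rw [hA, hB]
      have hUeq : pvUndisc (pvMatSet costs nr nc nd) = pvUndisc costs := by
        have := pvUndisc_set (m := m) (n := n) nd hshape hcellin
        rw [hval] at this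
        simpa [pvNoneW] using this
      have hPeq : pvPot (m * n).toNat (pvMatSet costs nr nc nd) + w.toNat
          = pvPot (m * n).toNat costs + nd.toNat := by
        have := pvPot_set (m := m) (n := n) (m * n).toNat nd hshape hcellin
        rw [hval] at this
        simpa [pvPotV] using this
      obtain ⟨hw0, hwJ⟩ := hJmat nr nc w hcellin hval
      apply pvPush m n d nd nr nc pq costs pend dist
        ⟨⟨hshape, hcells, hbound, hJpq, hJmat, hpair, htgt⟩, ⟨hdist, hdom, hpend, hnp, hnd⟩, hd0, hdJ⟩
        hcellin hnd0.1
      · intro w0 hw0'; rw [hval] at hw0'; injection hw0' with hw0'; omega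
      · omega
      · generalize hmn : m * n = MN at hwJ ⊢
        omega
      · have : nd.toNat < w.toNat := by omega
        omega
    case neg =>
      rw [if_neg (by simpa using hlt)] at hA hB
      rw [hA, hB]
      exact ⟨⟨⟨hshape, hcells, hbound, hJpq, hJmat, hpair, htgt⟩, ⟨hdist, hdom, hpend, hnp, hnd⟩, hd0, hdJ⟩, le_refl _⟩

-- ---------- popping the same element on both sides ----------
lemma pvBpop (pq : List (Int × Int × Int)) (costs : List (List (Option Int)))
    (pend : PySem.Dict (Int × Int) Int)
    (hpend : ∀ r c v, pend.get? (r, c) = some v ↔ ((v, r, c) ∈ pq ∧ pvMatGet costs r c = some v))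
    (hnp : pend.keys.Nodup)
    (e : Int × Int × Int)
    (hemem : e ∈ pq) (hminle : ∀ y ∈ pq, pvEntryLe e y = true)
    (hnonstale : pvMatGet costs e.2.1 e.2.2 = some e.1) :
    ∃ it its, pend.items = it :: its ∧ pvMinItem it its = ((e.2.1, e.2.2), e.1) := by
  have hg : pend.get? (e.2.1, e.2.2) = some e.1 :=
    (hpend e.2.1 e.2.2 e.1).mpr ⟨hemem, hnonstale⟩
  have hitem : ((e.2.1, e.2.2), e.1) ∈ pend.items := PySem.Dict.mem_items_of_get?_eq_some pend hg
  cases hits : pend.items with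
  | nil => rw [hits] at hitem; cases hitem
  | cons it its =>
    refine ⟨it, its, rfl, ?_⟩
    obtain ⟨hm_mem, hm_le⟩ := pvMinItem_spec its it
    have hbm_items : pvMinItem it its ∈ pend.items := by
      rw [hits]
      rcases hm_mem with h | h
      · rw [h]; exact List.mem_cons_self
      · exact List.mem_cons_of_mem _ h
    have hbm_get : pend.get? (pvMinItem it its).1 = some (pvMinItem it its).2 :=
      PySem.Dict.get?_of_mem_items pend hbm_items hnp
    obtain ⟨hbm_pq, hbm_val⟩ :=
      (hpend (pvMinItem it its).1.1 (pvMinItem it its).1.2 (pvMinItem it its).2).mp hbm_get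
    have h1 : pvEntryLe e (pvKeyOf (pvMinItem it its)) = true := hminle _ hbm_pq
    have h2 : pvEntryLe (pvKeyOf (pvMinItem it its)) (pvKeyOf ((e.2.1, e.2.2), e.1)) = true := by
      apply hm_le
      rw [hits] at hitem
      exact List.mem_cons.mp hitem
    have hkey : pvKeyOf ((e.2.1, e.2.2), e.1) = e := rfl
    rw [hkey] at h2
    have heq := pvEntryLe_antisymm h2 h1
    have hc1 : (pvMinItem it its).2 = e.1 := congrArg (fun z => z.1) heq
    have hc2 : (pvMinItem it its).1.1 = e.2.1 := congrArg (fun z => z.2.1) heq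
    have hc3 : (pvMinItem it its).1.2 = e.2.2 := congrArg (fun z => z.2.2) heq
    rw [Prod.ext_iff, Prod.ext_iff]
    exact ⟨⟨hc2, hc3⟩, hc1⟩

-- ---------- removing the popped entry ----------
lemma pvWinv_erase (m n : Int) (pq : List (Int × Int × Int)) (costs : List (List (Option Int)))
    (hW : pvWinv m n pq costs) (e : Int × Int × Int) (_hemem : e ∈ pq)
    (hnt : ¬ (e.2.1 = m - 1 ∧ e.2.2 = n - 1)) :
    pvWinv m n (pq.erase e) costs := by
  obtain ⟨hshape, hcells, hbound, hJpq, hJmat, hpair, htgt⟩ := hW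
  refine ⟨hshape, ?_, ?_, ?_, hJmat, List.Pairwise.sublist List.erase_sublist hpair, ?_⟩
  · exact fun e' he' => hcells e' (List.mem_of_mem_erase he')
  · exact fun e' he' => hbound e' (List.mem_of_mem_erase he')
  · exact fun e' he' => hJpq e' (List.mem_of_mem_erase he')
  · intro w hw
    have hmem := htgt w hw
    have hne : (w, m - 1, n - 1) ≠ e := by
      intro h
      apply hnt
      constructor
      · exact (congrArg (fun z => z.2.1) h).symm
      · exact (congrArg (fun z => z.2.2) h).symm
    exact ((pvNodup_of_pairwise hpair).mem_erase_iff.mpr ⟨hne, hmem⟩)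

-- ---------- the simulation ----------
lemma pvSim (grid : List (List Int)) (m n : Int) :
    ∀ fA fB : Nat, ∀ pq costs pend dist,
      pvWinv m n pq costs → pvRrel m n pq costs pend dist →
      pvMu (m * n).toNat pq costs < fA → fA ≤ fB →
      pvLoopA grid m n fA pq costs = pvLoopB grid m n fB pend dist := by
  intro fA
  induction fA with
  | zero => intro fB pq costs pend dist _ _ hmu _; omega
  | succ fA ih =>
    intro fB pq costs pend dist hW hR hmu hle
    obtain ⟨hshape, hcells, hbound, hJpq, hJmat, hpair, htgt⟩ := hW
    obtain ⟨hdist, hdom, hpend, hnp, hnd⟩ := hR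
    cases fB with
    | zero => omega
    | succ fB =>
    cases pq with
    | nil =>
      have hitems : pend.items = [] := by
        cases hits : pend.items with
        | nil => rfl
        | cons p ps =>
          exfalso
          have hpm : p ∈ pend.items := by rw [hits]; exact List.mem_cons_self
          have hg : pend.get? p.1 = some p.2 := PySem.Dict.get?_of_mem_items pend hpm hnp
          obtain ⟨hmem, _⟩ := (hpend p.1.1 p.1.2 p.2).mp hg
          cases hmem
      have hAn : pvLoopA grid m n (fA + 1) [] costs = -1 := by
        simp [pvLoopA, pvHeapPop]
      have hBn : pvLoopB grid m n (fB + 1) pend dist = -1 := by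
        simp [pvLoopB, hitems]
      rw [hAn, hBn]
    | cons x xs =>
      obtain ⟨hm_mem, hm_le⟩ := pvHeapMin_spec xs x
      have hemem : pvHeapMin x xs ∈ x :: xs := by
        rcases hm_mem with h | h
        · rw [h]; exact List.mem_cons_self
        · exact List.mem_cons_of_mem _ h
      have hminle : ∀ y ∈ x :: xs, pvEntryLe (pvHeapMin x xs) y = true := by
        intro y hy
        exact hm_le y (List.mem_cons.mp hy)
      obtain ⟨w, hw, hwle⟩ := hbound _ hemem
      have hmge1 : 1 ≤ m := by
        obtain ⟨_, h2, _, _⟩ := hcells _ hemem; omega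
      have hnge1 : 1 ≤ n := by
        obtain ⟨_, _, _, h4⟩ := hcells _ hemem; omega
      have hAun : pvLoopA grid m n (fA + 1) (x :: xs) costs =
          (if (pvHeapMin x xs).2.1 = m - 1 ∧ (pvHeapMin x xs).2.2 = n - 1 then (pvHeapMin x xs).1
           else if (match pvMatGet costs (pvHeapMin x xs).2.1 (pvHeapMin x xs).2.2 with
               | none => false | some w => decide (w < (pvHeapMin x xs).1))
           then pvLoopA grid m n fA ((x :: xs).erase (pvHeapMin x xs)) costs
           else
             pvLoopA grid m n fA
               ((PySem.List.enumerate pvDirs).foldl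
                   (pvRelaxA grid m n (pvHeapMin x xs).1 (pvHeapMin x xs).2.1 (pvHeapMin x xs).2.2)
                   ((x :: xs).erase (pvHeapMin x xs), costs)).1
               ((PySem.List.enumerate pvDirs).foldl
                   (pvRelaxA grid m n (pvHeapMin x xs).1 (pvHeapMin x xs).2.1 (pvHeapMin x xs).2.2)
                   ((x :: xs).erase (pvHeapMin x xs), costs)).2) := by
        simp only [pvLoopA, pvHeapPop]
      by_cases htgtc : (pvHeapMin x xs).2.1 = m - 1 ∧ (pvHeapMin x xs).2.2 = n - 1
      case pos =>
        -- the popped entry is the target: both return its cost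
        have hweq : w = (pvHeapMin x xs).1 := by
          have hwt : pvMatGet costs (m - 1) (n - 1) = some w := by
            rw [← htgtc.1, ← htgtc.2]; exact hw
          have hmemt := htgt w hwt
          have hlet := hminle _ hmemt
          rw [show pvHeapMin x xs = ((pvHeapMin x xs).1, (pvHeapMin x xs).2.1, (pvHeapMin x xs).2.2) from rfl,
              pvEntryLe_iff] at hlet
          obtain ⟨ht1, ht2⟩ := htgtc
          omega
        obtain ⟨it, its, hits, hbmEq⟩ := pvBpop (x :: xs) costs pend hpend hnp (pvHeapMin x xs)
          hemem hminle (by rw [hw, hweq])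
        have hBun : pvLoopB grid m n (fB + 1) pend dist = (pvHeapMin x xs).1 := by
          simp only [pvLoopB, hits, hbmEq]
          rw [if_pos htgtc]
        rw [hAun, if_pos htgtc, hBun]
      case neg =>
      by_cases hstale : w < (pvHeapMin x xs).1
      case pos =>
        -- stale entry: A skips it, B's state is unchanged
        rw [hAun, if_neg htgtc, if_pos (by rw [hw]; simpa using hstale)]
        apply ih
        · exact pvWinv_erase m n (x :: xs) costs
            ⟨hshape, hcells, hbound, hJpq, hJmat, hpair, htgt⟩ _ hemem htgtc
        · refine ⟨hdist, hdom, ?_, hnp, hnd⟩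
          intro r c v
          rw [hpend r c v]
          constructor
          · intro ⟨hmem, hval⟩
            refine ⟨?_, hval⟩
            apply (pvNodup_of_pairwise hpair).mem_erase_iff.mpr
            refine ⟨?_, hmem⟩
            intro hcontr
            have h1 : pvMatGet costs r c = some w := by
              rw [show r = (pvHeapMin x xs).2.1 from congrArg (fun z => z.2.1) hcontr,
                  show c = (pvHeapMin x xs).2.2 from congrArg (fun z => z.2.2) hcontr]
              exact hw
            rw [h1] at hval
            injection hval with hval
            have : v = (pvHeapMin x xs).1 := congrArg (fun z => z.1) hcontr
            omega
          · intro ⟨hmem, hval⟩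
            exact ⟨List.mem_of_mem_erase hmem, hval⟩
        · have hlen := List.length_erase_of_mem hemem
          unfold pvMu at hmu ⊢
          rw [hlen]
          simp only [List.length_cons] at hmu ⊢
          omega
        · omega
      case neg =>
        -- non-stale, non-target: both relax the neighbours and recurse
        have hweq : w = (pvHeapMin x xs).1 := by omega
        obtain ⟨it, its, hits, hbmEq⟩ := pvBpop (x :: xs) costs pend hpend hnp (pvHeapMin x xs)
          hemem hminle (by rw [hw, hweq])
        have hnonstale : pvMatGet costs (pvHeapMin x xs).2.1 (pvHeapMin x xs).2.2
            = some (pvHeapMin x xs).1 := by rw [hw, hweq]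
        -- invariant for the states right after the pop
        have hmid0 : pvMid m n (pvHeapMin x xs).1 ((x :: xs).erase (pvHeapMin x xs)) costs
            (pend.erase ((pvHeapMin x xs).2.1, (pvHeapMin x xs).2.2)) dist := by
          refine ⟨pvWinv_erase m n (x :: xs) costs
              ⟨hshape, hcells, hbound, hJpq, hJmat, hpair, htgt⟩ _ hemem htgtc,
            ⟨hdist, hdom, ?_, pvNodupKeys_erase pend _ hnp, hnd⟩,
            (hJpq _ hemem).1, (hJpq _ hemem).2⟩
          intro r c v
          rw [pvGet?_erase]
          by_cases hkc : ((r : Int), (c : Int)) = ((pvHeapMin x xs).2.1, (pvHeapMin x xs).2.2)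
          · rw [if_pos hkc]
            constructor
            · intro h; cases h
            · intro ⟨hmem, hval⟩
              have hr : r = (pvHeapMin x xs).2.1 := (Prod.ext_iff.mp hkc).1
              have hc : c = (pvHeapMin x xs).2.2 := (Prod.ext_iff.mp hkc).2
              rw [hr, hc, hnonstale] at hval
              injection hval with hval
              have : (v, r, c) = pvHeapMin x xs := by
                rw [Prod.ext_iff, Prod.ext_iff]
                exact ⟨hval.symm, hr, hc⟩
              rw [this] at hmem
              exact absurd rfl ((pvNodup_of_pairwise hpair).mem_erase_iff.mp hmem).1
          · rw [if_neg hkc, hpend r c v]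
            have hne3 : ∀ v' : Int, (v', r, c) ≠ pvHeapMin x xs := by
              intro v' hcontr
              apply hkc
              rw [Prod.ext_iff]
              exact ⟨congrArg (fun z => z.2.1) hcontr, congrArg (fun z => z.2.2) hcontr⟩
            constructor
            · intro ⟨hmem, hval⟩
              exact ⟨(pvNodup_of_pairwise hpair).mem_erase_iff.mpr ⟨hne3 v, hmem⟩, hval⟩
            · intro ⟨hmem, hval⟩
              exact ⟨List.mem_of_mem_erase hmem, hval⟩
        -- the four matched relaxation steps
        have henumA : PySem.List.enumerate pvDirs
            = [((0 : Int), ((0 : Int), (1 : Int))), (1, (0, -1)), (2, (1, 0)), (3, (-1, 0))] := by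
          decide
        have henumB : PySem.List.enumerate pvDirs 1
            = [((1 : Int), ((0 : Int), (1 : Int))), (2, (0, -1)), (3, (1, 0)), (4, (-1, 0))] := by
          decide
        have hs1 := pvStep grid m n (pvHeapMin x xs).1 (pvHeapMin x xs).2.1 (pvHeapMin x xs).2.2 0 0 1
          _ _ _ _ hmid0
        have hs2 := pvStep grid m n (pvHeapMin x xs).1 (pvHeapMin x xs).2.1 (pvHeapMin x xs).2.2 1 0 (-1)
          _ _ _ _ hs1.1
        have hs3 := pvStep grid m n (pvHeapMin x xs).1 (pvHeapMin x xs).2.1 (pvHeapMin x xs).2.2 2 1 0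
          _ _ _ _ hs2.1
        have hs4 := pvStep grid m n (pvHeapMin x xs).1 (pvHeapMin x xs).2.1 (pvHeapMin x xs).2.2 3 (-1) 0
          _ _ _ _ hs3.1
        norm_num at hs1 hs2 hs3 hs4
        have hBun : pvLoopB grid m n (fB + 1) pend dist
            = pvLoopB grid m n fB
                ((PySem.List.enumerate pvDirs 1).foldl
                    (pvRelaxB grid m n (pvHeapMin x xs).1 (pvHeapMin x xs).2.1 (pvHeapMin x xs).2.2)
                    (pend.erase ((pvHeapMin x xs).2.1, (pvHeapMin x xs).2.2), dist)).1
                ((PySem.List.enumerate pvDirs 1).foldl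
                    (pvRelaxB grid m n (pvHeapMin x xs).1 (pvHeapMin x xs).2.1 (pvHeapMin x xs).2.2)
                    (pend.erase ((pvHeapMin x xs).2.1, (pvHeapMin x xs).2.2), dist)).2 := by
          simp only [pvLoopB, hits, hbmEq]
          rw [if_neg htgtc]
        rw [hAun, if_neg htgtc, if_neg (by rw [hw]; simpa using hstale), hBun, henumA, henumB]
        simp only [List.foldl_cons, List.foldl_nil]
        have hlen := List.length_erase_of_mem hemem
        have hμE : pvMu (m * n).toNat ((x :: xs).erase (pvHeapMin x xs)) costs + 1
            = pvMu (m * n).toNat (x :: xs) costs := by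
          unfold pvMu
          rw [hlen]
          simp only [List.length_cons]
          omega
        exact ih fB _ _ _ _ hs4.1.1 hs4.1.2.1
          (lt_of_le_of_lt (le_trans hs4.2 (le_trans hs3.2 (le_trans hs2.2 hs1.2))) (by omega))
          (by omega)

-- ---------- the initial states ----------
lemma pvInit (m n : Int) (hm : 0 < m) (hn : 0 < n) :
    pvWinv m n [(0, 0, 0)]
        (pvMatSet (List.replicate m.toNat (List.replicate n.toNat (none : Option Int))) 0 0 0) ∧
    pvRrel m n [(0, 0, 0)]
        (pvMatSet (List.replicate m.toNat (List.replicate n.toNat (none : Option Int))) 0 0 0)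
        (PySem.Dict.empty.insert (0, 0) 0) (PySem.Dict.empty.insert (0, 0) 0) ∧
    pvMu (m * n).toNat [(0, 0, 0)]
        (pvMatSet (List.replicate m.toNat (List.replicate n.toNat (none : Option Int))) 0 0 0)
      < pvFuel m n := by
  have hshape_rep : pvShape m n (List.replicate m.toNat (List.replicate n.toNat (none : Option Int))) := by
    refine ⟨by simp, ?_⟩
    intro row h
    rw [List.eq_of_mem_replicate h]
    simp
  have hcell00 : pvCellIn m n 0 0 := ⟨le_refl _, hm, le_refl _, hn⟩
  have hrepget : ∀ r c : Int, pvCellIn m n r c →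
      pvMatGet (List.replicate m.toNat (List.replicate n.toNat (none : Option Int))) r c = none := by
    intro r c h
    obtain ⟨hb1, hb2⟩ := pvCell_bounds hshape_rep h
    rw [pvMG _ h.1 h.2.2.1 hb1 hb2]
    simp [List.getElem_replicate]
  have hCget : ∀ r c : Int, pvCellIn m n r c →
      pvMatGet (pvMatSet (List.replicate m.toNat (List.replicate n.toNat (none : Option Int))) 0 0 0) r c
        = if r = 0 ∧ c = 0 then some 0 else none := by
    intro r c h
    by_cases h00 : r = 0 ∧ c = 0
    · rw [if_pos h00, h00.1, h00.2, pvMatGet_set_self 0 hshape_rep hcell00]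
    · rw [if_neg h00, pvMatGet_set_ne 0 hshape_rep hcell00 h h00, hrepget r c h]
  have hUrep : pvUndisc (List.replicate m.toNat (List.replicate n.toNat (none : Option Int)))
      = m.toNat * n.toNat := by
    simp [pvUndisc, List.map_replicate, List.sum_replicate, pvNoneW, smul_eq_mul]
  have hU : pvUndisc (pvMatSet (List.replicate m.toNat (List.replicate n.toNat (none : Option Int))) 0 0 0) + 1
      = m.toNat * n.toNat := by
    have := pvUndisc_set (m := m) (n := n) 0 hshape_rep hcell00
    rw [hrepget 0 0 hcell00] at this
    simp only [pvNoneW] at this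
    omega
  have hMN : ((m.toNat * n.toNat : Nat) : Int) = m * n := by
    push_cast
    rw [Int.toNat_of_nonneg hm.le, Int.toNat_of_nonneg hn.le]
  have hK : (m * n).toNat = m.toNat * n.toNat := by
    rw [← hMN, Int.toNat_natCast]
  have hUi : (pvUndisc (pvMatSet (List.replicate m.toNat (List.replicate n.toNat (none : Option Int))) 0 0 0) : Int) + 1
      = m * n := by
    rw [← hMN]
    exact_mod_cast hU
  refine ⟨⟨pvShape_set 0 hshape_rep hcell00, ?_, ?_, ?_, ?_, ?_, ?_⟩, ⟨?_, ?_, ?_, ?_, ?_⟩, ?_⟩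
  · intro e he
    simp only [List.mem_singleton] at he
    subst he
    exact hcell00
  · intro e he
    simp only [List.mem_singleton] at he
    subst he
    refine ⟨0, ?_, le_refl _⟩
    rw [hCget 0 0 hcell00, if_pos ⟨rfl, rfl⟩]
  · intro e he
    simp only [List.mem_singleton] at he
    subst he
    exact ⟨le_refl _, by omega⟩
  · intro r c w hcell hw
    rw [hCget r c hcell] at hw
    split at hw
    · injection hw with hw
      subst hw
      exact ⟨le_refl _, by omega⟩
    · cases hw
  · exact List.pairwise_singleton _ _
  · intro w hw
    have hcellT : pvCellIn m n (m - 1) (n - 1) := ⟨by omega, by omega, by omega, by omega⟩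
    rw [hCget _ _ hcellT] at hw
    split at hw
    · next h00 =>
      injection hw with hw
      subst hw
      simp [h00.1, h00.2]
    · cases hw
  · intro r c hcell
    rw [PySem.Dict.get?_insert, PySem.Dict.get?_empty, hCget r c hcell]
    by_cases h : ((r : Int), (c : Int)) = ((0 : Int), (0 : Int))
    · rw [if_pos h, if_pos ⟨(Prod.ext_iff.mp h).1, (Prod.ext_iff.mp h).2⟩]
    · rw [if_neg h, if_neg (fun hc => h (by rw [hc.1, hc.2]))]
  · intro k v hk
    rw [PySem.Dict.get?_insert, PySem.Dict.get?_empty] at hk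
    split at hk
    · next h => rw [h]; exact hcell00
    · cases hk
  · intro r c v
    rw [PySem.Dict.get?_insert, PySem.Dict.get?_empty]
    by_cases h : ((r : Int), (c : Int)) = ((0 : Int), (0 : Int))
    · have hr : r = 0 := (Prod.ext_iff.mp h).1
      have hc : c = 0 := (Prod.ext_iff.mp h).2
      subst hr; subst hc
      rw [if_pos rfl]
      constructor
      · intro hv
        injection hv with hv
        subst hv
        exact ⟨by simp, by rw [hCget 0 0 hcell00, if_pos ⟨rfl, rfl⟩]⟩
      · intro ⟨hmem, hval⟩
        rw [hCget 0 0 hcell00, if_pos ⟨rfl, rfl⟩] at hval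
        injection hval with hval
        rw [hval]
    · rw [if_neg h]
      constructor
      · intro hv; cases hv
      · intro ⟨hmem, hval⟩
        simp only [List.mem_singleton, Prod.mk.injEq] at hmem
        exact absurd (by rw [hmem.2.1, hmem.2.2]) h
  · exact PySem.Dict.nodup_keys_insert _ _ _ PySem.Dict.nodup_keys_empty
  · exact PySem.Dict.nodup_keys_insert _ _ _ PySem.Dict.nodup_keys_empty
  · -- the fuel bound
    have hPrep : pvPot (m * n).toNat (List.replicate m.toNat (List.replicate n.toNat (none : Option Int)))
        = m.toNat * (n.toNat * ((m * n).toNat + 1)) := by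
      simp [pvPot, List.map_replicate, List.sum_replicate, pvPotV, smul_eq_mul]
    have hPC : pvPot (m * n).toNat (pvMatSet (List.replicate m.toNat (List.replicate n.toNat (none : Option Int))) 0 0 0)
          + ((m * n).toNat + 1)
        = m.toNat * (n.toNat * ((m * n).toNat + 1)) := by
      have := pvPot_set (m := m) (n := n) (m * n).toNat 0 hshape_rep hcell00
      rw [hrepget 0 0 hcell00] at this
      simp only [pvPotV, Int.toNat_zero] at this
      omega
    have hassoc : m.toNat * (n.toNat * ((m * n).toNat + 1))
        = (m.toNat * n.toNat) * ((m * n).toNat + 1) := (mul_assoc _ _ _).symm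
    have h2 : (m.toNat * n.toNat) * ((m * n).toNat + 1)
        ≤ ((m * n).toNat + 1) * ((m * n).toNat + 1) :=
      Nat.mul_le_mul_right _ (by omega)
    have h3 : 4 * ((m * n).toNat + 1) * ((m * n).toNat + 1)
        = 4 * (((m * n).toNat + 1) * ((m * n).toNat + 1)) := by
      rw [mul_assoc]
    unfold pvMu pvFuel
    simp only [List.length_singleton]
    rw [h3]
    rw [hassoc] at hPC
    generalize hKX : (m.toNat * n.toNat) * ((m * n).toNat + 1) = KX at hPC h2
    generalize hXX : ((m * n).toNat + 1) * ((m * n).toNat + 1) = XX at h2 ⊢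
    omega

-- ===== VERDICT (by name: the statement is the Claim_ definition above) =====
theorem minimum_cost_to_make_valid_path_spec : Claim_equal_minimum_cost_to_make_valid_path := by
  intro grid hdom hpre
  obtain ⟨hne, hpos, hrows⟩ := hpre
  unfold Spec_minimum_cost_to_make_valid_path
  unfold minimum_cost_to_make_valid_path minimum_cost_to_make_valid_path_alt
  have hm : 0 < ((grid.length : Int)) := by
    cases grid with
    | nil => exact absurd rfl hne
    | cons g gs => simp
  have hn : 0 < (((PySem.List.pyGetD grid 0 []).length : Int)) := by
    cases grid with
    | nil => exact absurd rfl hne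
    | cons g gs =>
      have h0 : PySem.List.pyGetD (g :: gs) 0 [] = g := by
        rw [PySem.List.pyGetD_of_nonneg _ _ le_rfl]
        rfl
      rw [h0]
      simpa using hpos
  obtain ⟨hW, hR, hmu⟩ :=
    pvInit (grid.length : Int) ((PySem.List.pyGetD grid 0 []).length : Int) hm hn
  exact pvSim grid _ _ _ _ _ _ _ _ hW hR hmu (le_refl _)
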